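-- pv_equiv track=rewrite | github.com/gerritgr/LumPy | ExprGenerator.py | delte_unused_betas
-- ===== SOURCE A (Python) =====
-- def delte_unused_betas(odes, beta_exprs):
-- 	used_betas = list()
-- 	seperators = " ,;,+,-,=,),(,*,/,**".split(',')
-- 	for ode in odes:
-- 		ode_formula = ode[0]
-- 		for ch in seperators:
-- 			ode_formula = ode_formula.replace(ch, ' '+ch+' ')
-- 		tokens = ode_formula.split(' ')
-- 		tokens = [t.strip() for t in tokens if 'beta_' in t]
-- 		for t in tokens:
-- 			used_betas.append(t)
-- 	beta_exprs = [beta for beta in beta_exprs if beta.split('=')[0].strip() in used_betas]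
-- 	return beta_exprs
-- ===== SOURCE B (Python) =====
-- def delte_unused_betas(odes, beta_exprs):
-- 	seps = set(' ;+-=()*/')
-- 	used = set()
-- 	for ode in odes:
-- 		token = []
-- 		for ch in ode[0] + ' ':  # trailing sentinel separator flushes the last token
-- 			if ch in seps:
-- 				t = ''.join(token)
-- 				if 'beta_' in t:
-- 					used.add(t.strip())
-- 				token = []
-- 			else:
-- 				token.append(ch)
-- 	return [beta for beta in beta_exprs if beta.split('=')[0].strip() in used]
-- ===== Notes on version B (the rewrite author's own statement) =====
-- stated objective: simpler
-- what changed: A expands each formula with ten sequential str.replace passes and then splits on spaces; B tokenizes each formula in one character scan that splits at the separator characters directly and collects the used beta names into a set.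
import Mathlib
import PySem

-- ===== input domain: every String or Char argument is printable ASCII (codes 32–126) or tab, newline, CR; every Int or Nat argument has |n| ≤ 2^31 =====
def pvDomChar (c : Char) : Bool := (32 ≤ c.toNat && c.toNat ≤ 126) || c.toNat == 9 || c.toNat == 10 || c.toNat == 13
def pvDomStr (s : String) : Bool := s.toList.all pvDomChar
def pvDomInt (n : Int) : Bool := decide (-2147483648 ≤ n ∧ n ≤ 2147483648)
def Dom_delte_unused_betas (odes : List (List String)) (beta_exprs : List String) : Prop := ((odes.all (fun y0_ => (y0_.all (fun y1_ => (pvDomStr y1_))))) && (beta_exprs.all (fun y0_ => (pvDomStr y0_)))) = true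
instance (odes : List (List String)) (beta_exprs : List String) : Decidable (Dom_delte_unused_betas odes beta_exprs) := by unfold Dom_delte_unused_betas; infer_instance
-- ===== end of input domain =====

-- B replaces A's ten sequential str.replace passes + split per formula by one single-pass
-- character scan collecting used beta names into a set (objective: simpler one-pass tokenizer).

-- ===== PORT A =====
-- literal port of A.  ode[0] raises IndexError on an empty ode (excluded by Pre_);
-- `List.headI` stands for that access.  s.split(',') with a nonempty separator never
-- raises, so `(PySem.Str.split? s ",").getD []` is exact, likewise split(' ') / split('=');
-- beta.split('=') is never empty, so [0] is its head.
def delte_unused_betas (odes : List (List String)) (beta_exprs : List String) : List String :=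
  let seperators := (PySem.Str.split? " ,;,+,-,=,),(,*,/,**" ",").getD []
  let used_betas := odes.foldl (fun used_betas ode =>
    let ode_formula := ode.headI
    let ode_formula := seperators.foldl
      (fun s ch => PySem.Str.replace s ch (" " ++ ch ++ " ")) ode_formula
    let tokens := (PySem.Str.split? ode_formula " ").getD []
    let tokens := (tokens.filter (fun t => PySem.Str.isIn "beta_" t)).map PySem.Str.strip
    used_betas ++ tokens) []
  beta_exprs.filter (fun beta =>
    used_betas.contains (PySem.Str.strip (((PySem.Str.split? beta "=").getD []).headI)))

-- ===== PORT B =====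
-- literal port of Source B.  `ch in seps` over the eight separator characters and space:
def pvSepB (c : Char) : Bool :=
  c == ' ' || c == ';' || c == '+' || c == '-' || c == '=' ||
  c == '(' || c == ')' || c == '*' || c == '/'

-- ''.join(token) of collected one-character strings = String.ofList of the collected chars (exact)
def delte_unused_betas_alt (odes : List (List String)) (beta_exprs : List String) : List String :=
  let used := odes.foldl (fun (used : PySem.Set String) ode =>
    ((ode.headI.toList ++ [' ']).foldl
      (fun (st : PySem.Set String × List Char) ch =>
        if pvSepB ch then
          let t := String.ofList st.2
          (if PySem.Str.isIn "beta_" t then st.1.add (PySem.Str.strip t) else st.1, [])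
        else (st.1, st.2 ++ [ch]))
      (used, [])).1) PySem.Set.empty
  beta_exprs.filter (fun beta =>
    used.contains (PySem.Str.strip (((PySem.Str.split? beta "=").getD []).headI)))

-- ===== PRECONDITION & SPEC =====
-- Pre_ excludes exactly the inputs where A raises: ode[0] is an IndexError when some ode is empty.
def Pre_delte_unused_betas (odes : List (List String)) (beta_exprs : List String) : Prop :=
  ∀ ode ∈ odes, ode ≠ []
instance (odes : List (List String)) (beta_exprs : List String) : Decidable (Pre_delte_unused_betas odes beta_exprs) := by unfold Pre_delte_unused_betas; infer_instance
def pvWitness_delte_unused_betas : List (List String) × List String :=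
  ([["beta_a + x"]], ["beta_a = 2", "beta_b = 3"])

def Spec_delte_unused_betas (odes : List (List String)) (beta_exprs : List String) (out : List String) : Prop := out = delte_unused_betas_alt odes beta_exprs
instance (odes : List (List String)) (beta_exprs : List String) (out : List String) : Decidable (Spec_delte_unused_betas odes beta_exprs out) := by unfold Spec_delte_unused_betas; infer_instance

-- ===== CLAIM (what is proved, stated in full; the proofs are below) =====
def Claim_equal_delte_unused_betas : Prop := ∀ (odes : List (List String)) (beta_exprs : List String), Dom_delte_unused_betas odes beta_exprs → Pre_delte_unused_betas odes beta_exprs → Spec_delte_unused_betas odes beta_exprs (delte_unused_betas odes beta_exprs)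

-- ===== LEMMAS AND PROOFS =====

-- per-character effect of A's nine single-character replace passes
def pvEf (c : Char) : List Char := if pvSepB c then [' ', c, ' '] else [c]

-- 'beta_' in t, on char lists
def pvP (t : List Char) : Bool := PySem.Chars.isIn ['b', 'e', 't', 'a', '_'] t

-- single-character replace is a flatMap
theorem pv_replace_go_single (c : Char) (new : List Char) :
    ∀ (fuel : Nat) (l acc : List Char), l.length ≤ fuel →
      PySem.Chars.replace.go [c] new fuel l acc
        = acc.reverse ++ l.flatMap (fun a => if a == c then new else [a]) := by
  intro fuel
  induction fuel with
  | zero =>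
    intro l acc h
    have : l = [] := List.eq_nil_of_length_eq_zero (Nat.le_zero.mp h)
    subst this; simp [PySem.Chars.replace.go]
  | succ n ih =>
    intro l acc h
    cases l with
    | nil => simp [PySem.Chars.replace.go]
    | cons a t =>
      simp only [PySem.Chars.replace.go]
      by_cases hac : c = a
      · subst hac
        have hpre : ([c].isPrefixOf (c :: t)) = true := by simp [List.isPrefixOf]
        rw [hpre]
        simp only [if_pos]
        rw [show List.drop [c].length (c :: t) = t from rfl]
        rw [ih t _ (by simpa using h)]
        simp
      · have hpre : ([c].isPrefixOf (a :: t)) = false := by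
          simp [List.isPrefixOf, hac]
        rw [hpre]
        simp only [Bool.false_eq_true, if_false]
        rw [ih t _ (by simpa using h)]
        simp [Ne.symm hac]

theorem pv_replace_single (l : List Char) (c : Char) (new : List Char) :
    PySem.Chars.replace l [c] new = l.flatMap (fun a => if a == c then new else [a]) := by
  rw [PySem.Chars.replace.eq_def]
  simp only [List.isEmpty_cons, Bool.false_eq_true, if_false]
  rw [pv_replace_go_single c new l.length l [] (le_refl _)]
  simp

-- replace is the identity when the pattern matches nowhere
theorem pv_replace_go_nomatch (old new : List Char) :
    ∀ (fuel : Nat) (l acc : List Char), l.length ≤ fuel →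
      (∀ t, t <:+ l → old.isPrefixOf t = false) →
      PySem.Chars.replace.go old new fuel l acc = acc.reverse ++ l := by
  intro fuel
  induction fuel with
  | zero =>
    intro l acc h _
    have : l = [] := List.eq_nil_of_length_eq_zero (Nat.le_zero.mp h)
    subst this; simp [PySem.Chars.replace.go]
  | succ n ih =>
    intro l acc h hnm
    cases l with
    | nil => simp [PySem.Chars.replace.go]
    | cons a t =>
      simp only [PySem.Chars.replace.go]
      rw [hnm (a :: t) (List.suffix_refl _)]
      simp only [Bool.false_eq_true, if_false]
      rw [ih t _ (by simpa using h) (fun u hu => hnm u (hu.trans (List.suffix_cons a t)))]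
      simp

-- after the nine expansions no two stars are adjacent, so the '**' pass is a no-op
theorem pv_pref1_false (a : Char) (l : List Char) (h : ('*' == a) = false) :
    (['*', '*'].isPrefixOf (a :: l)) = false := by
  simp [List.isPrefixOf, h]

theorem pv_pref2_false (a b : Char) (l : List Char) (h : ('*' == b) = false) :
    (['*', '*'].isPrefixOf (a :: b :: l)) = false := by
  simp [List.isPrefixOf, h]

theorem pv_no_double_star (s : List Char) :
    ∀ t, t <:+ s.flatMap pvEf → (['*', '*'].isPrefixOf t) = false := by
  induction s with
  | nil =>
    intro t ht
    simp only [List.flatMap_nil] at ht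
    rw [List.suffix_nil.mp ht]
    rfl
  | cons a s ih =>
    intro t ht
    simp only [List.flatMap_cons] at ht
    by_cases ha : pvSepB a
    · simp only [pvEf, ha, if_pos, List.cons_append, List.nil_append] at ht
      rcases List.suffix_cons_iff.mp ht with h1 | h1
      · subst h1; exact pv_pref1_false _ _ (by decide)
      rcases List.suffix_cons_iff.mp h1 with h2 | h2
      · subst h2; exact pv_pref2_false _ _ _ (by decide)
      rcases List.suffix_cons_iff.mp h2 with h3 | h3
      · subst h3; exact pv_pref1_false _ _ (by decide)
      · exact ih t h3
    · simp only [pvEf, ha, Bool.false_eq_true, if_false, List.singleton_append] at ht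
      rcases List.suffix_cons_iff.mp ht with h1 | h1
      · subst h1
        have hna : ('*' == a) = false := by
          have han : a ≠ '*' := by intro hh; subst hh; simp [pvSepB] at ha
          simp [Ne.symm han]
        exact pv_pref1_false _ _ hna
      · exact ih t h1

theorem pv_replace_dstar (s : List Char) (new : List Char) :
    PySem.Chars.replace (s.flatMap pvEf) ['*', '*'] new = s.flatMap pvEf := by
  rw [PySem.Chars.replace.eq_def]
  simp only [List.isEmpty_cons, Bool.false_eq_true, if_false]
  rw [pv_replace_go_nomatch _ new _ _ [] (le_refl _) (pv_no_double_star s)]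
  simp

theorem pv_modifyHead_id (l : List (List Char)) : List.modifyHead (fun x => x) l = l := by
  cases l <;> rfl

-- single-character splitOn is List.splitOnP
theorem pv_splitOn_go_single (c : Char) :
    ∀ (fuel : Nat) (l cur : List Char) (acc : List (List Char)), l.length ≤ fuel →
      PySem.Chars.splitOn.go [c] fuel l cur acc
        = acc.reverse ++ (List.splitOnP (fun a => a == c) l).modifyHead (cur.reverse ++ ·) := by
  intro fuel
  induction fuel with
  | zero =>
    intro l cur acc h
    have : l = [] := List.eq_nil_of_length_eq_zero (Nat.le_zero.mp h)
    subst this; simp [PySem.Chars.splitOn.go]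
  | succ n ih =>
    intro l cur acc h
    cases l with
    | nil => simp [PySem.Chars.splitOn.go]
    | cons a t =>
      simp only [PySem.Chars.splitOn.go]
      by_cases hac : c = a
      · subst hac
        have hpre : ([c].isPrefixOf (c :: t)) = true := by simp [List.isPrefixOf]
        rw [hpre]
        simp only [if_pos]
        rw [show List.drop [c].length (c :: t) = t from rfl]
        rw [ih t [] _ (by simpa using h)]
        simp [List.splitOnP_cons, pv_modifyHead_id]
      · have hpre : ([c].isPrefixOf (a :: t)) = false := by
          simp [List.isPrefixOf, hac]
        rw [hpre]
        simp only [Bool.false_eq_true, if_false]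
        rw [ih t (a :: cur) acc (by simpa using h)]
        have hbeq : (a == c) = false := by simp [Ne.symm hac]
        simp only [List.splitOnP_cons, hbeq, Bool.false_eq_true, if_false,
          List.modifyHead_modifyHead]
        have hfun : (fun x => (a :: cur).reverse ++ x) = ((fun x => cur.reverse ++ x) ∘ List.cons a) := by
          funext x; simp
        rw [hfun]

theorem pv_splitOn_single (l : List Char) (c : Char) :
    PySem.Chars.splitOn l [c] = List.splitOnP (fun a => a == c) l := by
  unfold PySem.Chars.splitOn
  rw [pv_splitOn_go_single c (l.length + 1) l [] [] (by omega)]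
  simp [pv_modifyHead_id]

-- the nine sequential replaces amount to one flatMap of pvEf
theorem pv_chain_eq (l : List Char) :
    PySem.Chars.replace (PySem.Chars.replace (PySem.Chars.replace (PySem.Chars.replace
      (PySem.Chars.replace (PySem.Chars.replace (PySem.Chars.replace (PySem.Chars.replace
        (PySem.Chars.replace l [' '] [' ', ' ', ' '])
        [';'] [' ', ';', ' ']) ['+'] [' ', '+', ' ']) ['-'] [' ', '-', ' '])
        ['='] [' ', '=', ' ']) [')'] [' ', ')', ' ']) ['('] [' ', '(', ' '])
        ['*'] [' ', '*', ' ']) ['/'] [' ', '/', ' ']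
      = l.flatMap pvEf := by
  simp only [pv_replace_single, List.flatMap_assoc]
  apply List.flatMap_congr
  intro a _
  by_cases h1 : a = ' '; · subst h1; rfl
  by_cases h2 : a = ';'; · subst h2; rfl
  by_cases h3 : a = '+'; · subst h3; rfl
  by_cases h4 : a = '-'; · subst h4; rfl
  by_cases h5 : a = '='; · subst h5; rfl
  by_cases h6 : a = ')'; · subst h6; rfl
  by_cases h7 : a = '('; · subst h7; rfl
  by_cases h8 : a = '*'; · subst h8; rfl
  by_cases h9 : a = '/'; · subst h9; rfl
  have hs : pvSepB a = false := by
    simp [pvSepB, h1, h2, h3, h4, h5, h6, h7, h8, h9]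
  simp [pvEf, hs, h1, h2, h3, h4, h5, h6, h7, h8, h9]

-- short tokens never contain 'beta_'
theorem pv_P_nil : pvP [] = false := by decide

theorem pv_P_single (c : Char) : pvP [c] = false := by
  rw [pvP, PySem.Chars.isIn_eq_false_iff]
  intro h
  have := h.length_le
  simp at this

-- splitting the expanded formula at spaces and keeping the beta tokens = splitting the original
-- formula at separator characters and keeping the beta tokens (and the heads agree)
theorem pv_main (t : List Char) :
    (List.splitOnP (fun a => a == ' ') (t.flatMap pvEf)).headI = (List.splitOnP pvSepB t).headI
    ∧ (List.splitOnP (fun a => a == ' ') (t.flatMap pvEf)).filter pvP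
        = (List.splitOnP pvSepB t).filter pvP := by
  induction t with
  | nil => simp [pv_P_nil]
  | cons c t ih =>
    obtain ⟨ih1, ih2⟩ := ih
    by_cases hc : pvSepB c
    · by_cases hsp : c = ' '
      · subst hsp
        constructor
        · simp [pvEf, hc, List.splitOnP_cons]
        · simp only [List.flatMap_cons, pvEf, hc, if_pos, List.cons_append, List.nil_append,
            List.splitOnP_cons, beq_self_eq_true, if_pos, List.filter_cons, pv_P_nil,
            Bool.false_eq_true, if_false]
          simpa [pv_P_nil] using ih2
      · have hcs : (c == ' ') = false := by simp [hsp]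
        constructor
        · simp [pvEf, hc, List.splitOnP_cons, hcs]
        · simp only [List.flatMap_cons, pvEf, hc, if_pos, List.cons_append, List.nil_append,
            List.splitOnP_cons, beq_self_eq_true, if_pos, hcs, Bool.false_eq_true, if_false]
          -- LHS tokens: [] :: (c :: head) with head = [] then the rest
          rcases List.exists_cons_of_ne_nil
            (List.splitOnP_ne_nil (fun a => a == ' ') (t.flatMap pvEf)) with ⟨x, xs, hx⟩
          rw [hx]
          simp only [List.modifyHead_cons]
          rw [hx] at ih2
          simp only [List.filter_cons, pv_P_nil, Bool.false_eq_true, if_false, pv_P_single]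
          -- [] :: [c] :: xs filtered = splitOnP sepB t filtered
          rcases List.exists_cons_of_ne_nil (List.splitOnP_ne_nil pvSepB t) with ⟨y, ys, hy⟩
          rw [hy]
          rw [hy] at ih2
          simpa [List.filter_cons, pv_P_single] using ih2
    · have hcs : (c == ' ') = false := by
        have hne : c ≠ ' ' := by intro hh; subst hh; simp [pvSepB] at hc
        simp [hne]
      simp only [List.flatMap_cons, pvEf, hc, Bool.false_eq_true, if_false, List.cons_append,
        List.nil_append, List.splitOnP_cons, hcs]
      rcases List.exists_cons_of_ne_nil
        (List.splitOnP_ne_nil (fun a => a == ' ') (t.flatMap pvEf)) with ⟨x, xs, hx⟩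
      rcases List.exists_cons_of_ne_nil (List.splitOnP_ne_nil pvSepB t) with ⟨y, ys, hy⟩
      rw [hx, hy]
      rw [hx, hy] at ih1 ih2
      simp only [List.headI] at ih1
      subst ih1
      have htail : List.filter pvP xs = List.filter pvP ys := by
        by_cases hpx0 : pvP x
        · have h2 := ih2
          simp only [List.filter_cons, hpx0, if_pos] at h2
          injection h2
        · have h2 := ih2
          simp only [List.filter_cons, hpx0, Bool.false_eq_true, if_false] at h2
          exact h2
      constructor
      · simp
      · simp only [List.modifyHead_cons, List.filter_cons]
        by_cases hpx : pvP (c :: x)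
        · simp only [hpx, if_pos, htail]
        · simp only [hpx, Bool.false_eq_true, if_false, htail]

-- 'beta_' in the string built from collected chars, on the char level
theorem pv_isIn_ofList (x : List Char) :
    PySem.Str.isIn "beta_" (String.ofList x) = pvP x := by
  simp [PySem.Str.isIn, pvP]

-- B's character scan over a formula (with the sentinel space) collects exactly the
-- stripped beta tokens of the separator-split formula into the set
theorem pv_scan (cs : List Char) :
    ∀ (used : PySem.Set String) (cur : List Char),
      ((cs ++ [' ']).foldl
        (fun (st : PySem.Set String × List Char) ch =>
          if pvSepB ch then
            let t := String.ofList st.2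
            (if PySem.Str.isIn "beta_" t then st.1.add (PySem.Str.strip t) else st.1, [])
          else (st.1, st.2 ++ [ch])) (used, cur)).1
      = ((((List.splitOnP pvSepB cs).modifyHead (cur ++ ·)).filter pvP).map
          (fun t => PySem.Str.strip (String.ofList t))).foldl PySem.Set.add used := by
  induction cs with
  | nil =>
    intro used cur
    simp only [List.nil_append, List.foldl_cons, List.foldl_nil, List.splitOnP_nil,
      List.modifyHead_cons, List.append_nil, List.filter_cons, List.filter_nil]
    rw [show pvSepB ' ' = true from rfl]
    simp only [if_pos, pv_isIn_ofList]
    by_cases hp : pvP cur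
    · simp [hp]
    · simp [hp]
  | cons a cs ih =>
    intro used cur
    by_cases ha : pvSepB a
    · simp only [List.cons_append, List.foldl_cons, ha, if_pos]
      rw [ih _ []]
      rw [pv_isIn_ofList]
      have hid : (fun x => ([] : List Char) ++ x) = (fun x => x) := by funext x; simp
      rw [hid, pv_modifyHead_id]
      simp only [List.splitOnP_cons, ha, if_pos, List.modifyHead_cons, List.append_nil,
        List.filter_cons]
      by_cases hp : pvP cur
      · simp [hp]
      · simp [hp]
    · simp only [List.cons_append, List.foldl_cons, ha, Bool.false_eq_true, if_false]
      rw [ih _ (cur ++ [a])]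
      simp only [List.splitOnP_cons, ha, Bool.false_eq_true, if_false,
        List.modifyHead_modifyHead]
      have hfun : (fun x => (cur ++ [a]) ++ x) = ((cur ++ ·) ∘ List.cons a) := by
        funext x; simp
      rw [hfun]

-- A's per-formula pipeline (ten replaces, split(' '), keep 'beta_' tokens, strip)
-- equals the separator-split tokens of the original formula, kept and stripped
theorem pv_A_tokens (s : String) :
    ((((PySem.Str.split? (List.foldl (fun s ch => PySem.Str.replace s ch (" " ++ ch ++ " ")) s
        ((PySem.Str.split? " ,;,+,-,=,),(,*,/,**" ",").getD [])) " ").getD []).filter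
          (fun t => PySem.Str.isIn "beta_" t)).map PySem.Str.strip)
      = (((List.splitOnP pvSepB s.toList).filter pvP).map
          (fun t => PySem.Str.strip (String.ofList t))) := by
  rw [show (PySem.Str.split? " ,;,+,-,=,),(,*,/,**" ",").getD []
      = [" ", ";", "+", "-", "=", ")", "(", "*", "/", "**"] from by decide]
  simp only [List.foldl_cons, List.foldl_nil]
  simp only [PySem.Str.replace, String.toList_ofList]
  rw [show (" " ++ " " ++ " ").toList = [' ', ' ', ' '] from rfl,
      show (" " ++ ";" ++ " ").toList = [' ', ';', ' '] from rfl,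
      show (" " ++ "+" ++ " ").toList = [' ', '+', ' '] from rfl,
      show (" " ++ "-" ++ " ").toList = [' ', '-', ' '] from rfl,
      show (" " ++ "=" ++ " ").toList = [' ', '=', ' '] from rfl,
      show (" " ++ ")" ++ " ").toList = [' ', ')', ' '] from rfl,
      show (" " ++ "(" ++ " ").toList = [' ', '(', ' '] from rfl,
      show (" " ++ "*" ++ " ").toList = [' ', '*', ' '] from rfl,
      show (" " ++ "/" ++ " ").toList = [' ', '/', ' '] from rfl,
      show (" " ++ "**" ++ " ").toList = [' ', '*', '*', ' '] from rfl,
      show (" " : String).toList = [' '] from rfl,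
      show (";" : String).toList = [';'] from rfl,
      show ("+" : String).toList = ['+'] from rfl,
      show ("-" : String).toList = ['-'] from rfl,
      show ("=" : String).toList = ['='] from rfl,
      show (")" : String).toList = [')'] from rfl,
      show ("(" : String).toList = ['('] from rfl,
      show ("*" : String).toList = ['*'] from rfl,
      show ("/" : String).toList = ['/'] from rfl,
      show ("**" : String).toList = ['*', '*'] from rfl]
  rw [pv_chain_eq, pv_replace_dstar]
  rw [show ∀ l : List Char, PySem.Str.split? (String.ofList l) " "
        = some ((PySem.Chars.splitOn l [' ']).map String.ofList) from
      fun l => by simp [PySem.Str.split?, PySem.Chars.split?]]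
  simp only [Option.getD_some]
  rw [pv_splitOn_single]
  rw [List.filter_map, List.map_map]
  have hcomp : ((fun t => PySem.Str.isIn "beta_" t) ∘ String.ofList) = pvP := by
    funext x; exact pv_isIn_ofList x
  rw [hcomp, (pv_main s.toList).2]
  rfl

-- folding per-ode token lists into the set = folding their concatenation
theorem pv_foldl_flat (g : List String → List String) (odes : List (List String)) :
    ∀ (init : PySem.Set String),
      odes.foldl (fun u ode => (g ode).foldl PySem.Set.add u) init
        = (odes.flatMap g).foldl PySem.Set.add init := by
  induction odes with
  | nil => intro init; simp
  | cons o os ih => intro init; simp [List.foldl_append, ih]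

-- ===== VERDICT (by name: the statement is the Claim_ definition above) =====
theorem delte_unused_betas_spec : Claim_equal_delte_unused_betas := by
  intro odes beta_exprs _ _
  unfold Spec_delte_unused_betas delte_unused_betas delte_unused_betas_alt
  apply (List.filter_congr _).symm
  intro beta _
  -- the looked-up key is the same term on both sides; show the containers agree
  have hA : (odes.foldl (fun used_betas ode =>
      used_betas ++
        (((((PySem.Str.split? (List.foldl
            (fun s ch => PySem.Str.replace s ch (" " ++ ch ++ " ")) ode.headI
            ((PySem.Str.split? " ,;,+,-,=,),(,*,/,**" ",").getD [])) " ").getD []).filter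
              (fun t => PySem.Str.isIn "beta_" t)).map PySem.Str.strip))) [])
      = odes.flatMap (fun ode => ((List.splitOnP pvSepB ode.headI.toList).filter pvP).map
          (fun t => PySem.Str.strip (String.ofList t))) := by
    rw [PySem.List.foldl_append_eq_flatMap]
    simp only [List.nil_append]
    apply List.flatMap_congr
    intro ode _
    exact pv_A_tokens ode.headI
  have hB : (odes.foldl (fun (used : PySem.Set String) ode =>
      ((ode.headI.toList ++ [' ']).foldl
        (fun (st : PySem.Set String × List Char) ch =>
          if pvSepB ch then
            let t := String.ofList st.2
            (if PySem.Str.isIn "beta_" t then st.1.add (PySem.Str.strip t) else st.1, [])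
          else (st.1, st.2 ++ [ch])) (used, [])).1) PySem.Set.empty)
      = PySem.Set.ofList (odes.flatMap (fun ode =>
          ((List.splitOnP pvSepB ode.headI.toList).filter pvP).map
            (fun t => PySem.Str.strip (String.ofList t)))) := by
    have hstep : (fun (used : PySem.Set String) ode =>
        ((ode.headI.toList ++ [' ']).foldl
          (fun (st : PySem.Set String × List Char) ch =>
            if pvSepB ch then
              let t := String.ofList st.2
              (if PySem.Str.isIn "beta_" t then st.1.add (PySem.Str.strip t) else st.1, [])
            else (st.1, st.2 ++ [ch])) (used, [])).1)
        = (fun (used : PySem.Set String) (ode : List String) =>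
            (((List.splitOnP pvSepB ode.headI.toList).filter pvP).map
              (fun t => PySem.Str.strip (String.ofList t))).foldl PySem.Set.add used) := by
      funext used ode
      rw [pv_scan]
      rw [show (fun x => ([] : List Char) ++ x) = (fun x : List Char => x) from by
            funext x; simp,
          pv_modifyHead_id]
    rw [hstep, pv_foldl_flat, PySem.Set.ofList_eq_foldl]
    rfl
  rw [hA, hB]
  set L := odes.flatMap (fun ode => ((List.splitOnP pvSepB ode.headI.toList).filter pvP).map
      (fun t => PySem.Str.strip (String.ofList t)))
  apply Bool.eq_iff_iff.mpr
  rw [List.contains_iff_mem, PySem.Set.contains_iff, PySem.Set.mem_ofList]
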